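-- pv_equiv track=rewrite | github.com/pc5401/my_BOJ | 백준/Silver/2090. 조화평균/조화평균.py | solve
-- ===== SOURCE A (Python) =====
-- from math import gcd
--
-- def solve(N, A):
--     p, q = 0, 1
--     for a in A:
--         p = p * a + q
--         q = q * a
--         g = gcd(p, q)
--         p //= g
--         q //= g
--     num, den = q, p
--     g = gcd(num, den)
--     num //= g
--     den //= g
--     return f"{num}/{den}"
-- ===== SOURCE B (Python) =====
-- from math import gcd
--
-- def solve(N, A):
--     # suffix products: suf[i] = product of A[i:]
--     suf = [1]
--     for a in reversed(A):
--         suf.append(a * suf[-1])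
--     suf.reverse()
--     den = 0
--     pre = 1  # running product of A[:i]
--     for i, a in enumerate(A):
--         den += pre * suf[i + 1]   # product of all elements except A[i]
--         pre = pre * a
--     num = pre                      # product of all elements
--     g = gcd(num, den)
--     return f"{num // g}/{den // g}"
-- ===== Notes on version B (the rewrite author's own statement) =====
-- stated objective: alternative
-- what changed: Instead of A's incremental fraction accumulation with a gcd reduction at every step, B computes the common-denominator pair directly (product of all elements via a running prefix product, and the sum of products-of-all-others via a precomputed suffix-product array) and performs a single gcd reduction at the end.
import Mathlib
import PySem

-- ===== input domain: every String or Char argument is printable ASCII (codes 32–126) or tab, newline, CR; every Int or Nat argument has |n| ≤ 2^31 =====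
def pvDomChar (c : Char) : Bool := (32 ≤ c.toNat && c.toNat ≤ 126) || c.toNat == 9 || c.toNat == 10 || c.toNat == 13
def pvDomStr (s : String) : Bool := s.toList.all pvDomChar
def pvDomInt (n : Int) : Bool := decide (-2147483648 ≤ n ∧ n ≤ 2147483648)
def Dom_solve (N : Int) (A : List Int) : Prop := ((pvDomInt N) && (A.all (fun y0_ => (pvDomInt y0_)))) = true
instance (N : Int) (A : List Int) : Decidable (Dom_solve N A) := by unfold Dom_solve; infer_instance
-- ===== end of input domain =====

-- B computes the reduced fraction num/den in one shot (product of all elements, and the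
-- sum of products-of-all-others via a suffix-product array) with a single final gcd,
-- instead of A's step-by-step fraction accumulation that reduces by a gcd at every element.

-- ===== PORT A =====
-- A's loop: p = p*a + q; q = q*a; g = gcd(p,q); p //= g; q //= g
def solveLoop (xs : List Int) (p q : Int) : Int × Int :=
  match xs with
  | [] => (p, q)
  | a :: rest =>
    let p1 := p * a + q
    let q1 := q * a
    let g : Int := Int.gcd p1 q1
    solveLoop rest (PySem.Int.floordiv p1 g) (PySem.Int.floordiv q1 g)

def solve (N : Int) (A : List Int) : String :=
  let r := solveLoop A 0 1
  let num := r.2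
  let den := r.1
  let g : Int := Int.gcd num den
  PySem.Int.toStr (PySem.Int.floordiv num g) ++ "/" ++ PySem.Int.toStr (PySem.Int.floordiv den g)

-- ===== PORT B =====
-- suffix products (Source B builds them back-to-front): sufProds xs = [prod xs[0:], prod xs[1:], …, 1]
def sufProds (xs : List Int) : List Int :=
  match xs with
  | [] => [1]
  | a :: rest =>
    let s := sufProds rest
    (a * s.headD 1) :: s

-- Source B's forward loop over (a, suf[i+1]) pairs, accumulating (den, pre)
def altLoop (xs suf1 : List Int) (den pre : Int) : Int × Int :=
  match xs, suf1 with
  | a :: rest, t :: ts => altLoop rest ts (den + pre * t) (pre * a)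
  | _, _ => (den, pre)

def solve_alt (N : Int) (A : List Int) : String :=
  let suf := sufProds A
  let r := altLoop A (suf.drop 1) 0 1
  let num := r.2
  let den := r.1
  let g : Int := Int.gcd num den
  PySem.Int.toStr (PySem.Int.floordiv num g) ++ "/" ++ PySem.Int.toStr (PySem.Int.floordiv den g)

-- ===== PRECONDITION & SPEC =====
-- Pre_ excludes lists containing two or more zeros: there A's step gcd becomes gcd(0,0)=0 and
-- 'p //= g' raises ZeroDivisionError (B's single final gcd reduction raises there as well).
def Pre_solve (N : Int) (A : List Int) : Prop := A.count 0 ≤ 1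
instance (N : Int) (A : List Int) : Decidable (Pre_solve N A) := by unfold Pre_solve; infer_instance
def pvWitness_solve : Int × List Int := (3, [2, -3, 5])

def Spec_solve (N : Int) (A : List Int) (out : String) : Prop := out = solve_alt N A
instance (N : Int) (A : List Int) (out : String) : Decidable (Spec_solve N A out) := by unfold Spec_solve; infer_instance

-- ===== CLAIM (what is proved, stated in full; the proofs are below) =====
def Claim_equal_solve : Prop := ∀ (N : Int) (A : List Int), Dom_solve N A → Pre_solve N A → Spec_solve N A (solve N A)

-- ===== LEMMAS AND PROOFS =====

-- sum of products-of-all-others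
def othS : List Int → Int
  | [] => 0
  | a :: xs => xs.prod + a * othS xs

-- mathematical evolution of A's un-reduced state
def mS : List Int → Int → Int → Int
  | [], s, _ => s
  | a :: xs, s, t => mS xs (s * a + t) (t * a)

def mP : List Int → Int → Int
  | [], t => t
  | a :: xs, t => mP xs (t * a)

-- "(p,q) is the reduced form of (s,t)"
def RF (s t p q : Int) : Prop := ∃ g : Int, 0 < g ∧ s = g * p ∧ t = g * q ∧ Int.gcd p q = 1

lemma mS_eq : ∀ (xs : List Int) (s t : Int), mS xs s t = s * xs.prod + t * othS xs := by
  intro xs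
  induction xs with
  | nil => intro s t; simp [mS, othS]
  | cons a rest ih => intro s t; simp [mS, othS, ih]; ring

lemma mP_eq : ∀ (xs : List Int) (t : Int), mP xs t = t * xs.prod := by
  intro xs
  induction xs with
  | nil => intro t; simp [mP]
  | cons a rest ih => intro t; simp [mP, ih]; ring

lemma sufProds_headD (xs : List Int) : (sufProds xs).headD 1 = xs.prod := by
  induction xs with
  | nil => simp [sufProds]
  | cons a rest ih => simp only [sufProds, List.headD_cons, List.prod_cons, ih]

lemma altLoop_spec : ∀ (xs : List Int) (den pre : Int),
    altLoop xs ((sufProds xs).drop 1) den pre = (den + pre * othS xs, pre * xs.prod) := by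
  intro xs
  induction xs with
  | nil => intro den pre; simp [altLoop, othS]
  | cons a rest ih =>
    intro den pre
    have hsuf : sufProds rest = rest.prod :: (sufProds rest).drop 1 := by
      cases h : sufProds rest with
      | nil => cases rest <;> simp [sufProds] at h
      | cons y ys =>
        have := sufProds_headD rest
        rw [h] at this
        simp at this
        simp [this]
    calc altLoop (a :: rest) ((sufProds (a :: rest)).drop 1) den pre
        = altLoop rest ((sufProds rest).drop 1) (den + pre * rest.prod) (pre * a) := by
          rw [show (sufProds (a :: rest)).drop 1 = sufProds rest from by simp [sufProds]]
          rw [hsuf]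
          rfl
      _ = (den + pre * othS (a :: rest), pre * (a :: rest).prod) := by
          rw [ih]
          simp [othS]
          constructor <;> ring

-- loop invariant for A: carrying RF through one reduced step
lemma loop_main : ∀ (xs : List Int) (s t p q : Int),
    RF s t p q →
    ((t ≠ 0 ∧ xs.count 0 ≤ 1) ∨ (t = 0 ∧ s ≠ 0 ∧ xs.count 0 = 0)) →
    RF (mS xs s t) (mP xs t) (solveLoop xs p q).1 (solveLoop xs p q).2 := by
  intro xs
  induction xs with
  | nil => intro s t p q hrf _; simpa [solveLoop, mS, mP] using hrf
  | cons a rest ih =>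
    intro s t p q hrf hinv
    obtain ⟨g, hg, hs, ht, hcop⟩ := hrf
    -- the next un-reduced pair is (s*a+t, t*a); show it is not (0,0)
    have hnz : s * a + t ≠ 0 ∨ t * a ≠ 0 := by
      rcases hinv with ⟨htne, hcnt⟩ | ⟨ht0, hs0, hcnt⟩
      · by_cases ha : a = 0
        · left; simp [ha, htne]
        · right; exact mul_ne_zero htne ha
      · have ha : a ≠ 0 := by
          intro h0
          simp [h0] at hcnt
        left; simp [ht0]; exact ⟨hs0, ha⟩
    -- translate to the reduced pair
    have hp1 : s * a + t = g * (p * a + q) := by rw [hs, ht]; ring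
    have hq1 : t * a = g * (q * a) := by rw [ht]; ring
    have hnz' : p * a + q ≠ 0 ∨ q * a ≠ 0 := by
      rcases hnz with h | h
      · left; intro hc; rw [hp1, hc, mul_zero] at h; exact h rfl
      · right; intro hc; rw [hq1, hc, mul_zero] at h; exact h rfl
    have hgcdpos : 0 < Int.gcd (p * a + q) (q * a) := by
      rcases hnz' with h | h
      · exact Int.gcd_pos_of_ne_zero_left _ h
      · exact Int.gcd_pos_of_ne_zero_right _ h
    set g1 : Int := (Int.gcd (p * a + q) (q * a) : Int) with hg1def
    have hg1pos : 0 < g1 := by rw [hg1def]; exact_mod_cast hgcdpos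
    have hdvd1 : g1 ∣ (p * a + q) := by rw [hg1def]; exact Int.gcd_dvd_left _ _
    have hdvd2 : g1 ∣ (q * a) := by rw [hg1def]; exact Int.gcd_dvd_right _ _
    have hfd1 : PySem.Int.floordiv (p * a + q) g1 = (p * a + q) / g1 :=
      PySem.Int.floordiv_eq_ediv_of_pos hg1pos
    have hfd2 : PySem.Int.floordiv (q * a) g1 = (q * a) / g1 :=
      PySem.Int.floordiv_eq_ediv_of_pos hg1pos
    have hexact1 : g1 * ((p * a + q) / g1) = p * a + q := Int.mul_ediv_cancel' hdvd1
    have hexact2 : g1 * ((q * a) / g1) = q * a := Int.mul_ediv_cancel' hdvd2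
    have hcop' : Int.gcd ((p * a + q) / g1) ((q * a) / g1) = 1 :=
      Int.gcd_div_gcd_div_gcd hgcdpos
    -- new RF for the recursive call
    have hrf' : RF (s * a + t) (t * a) ((p * a + q) / g1) ((q * a) / g1) := by
      refine ⟨g * g1, mul_pos hg hg1pos, ?_, ?_, hcop'⟩
      · rw [hp1, mul_assoc, hexact1]
      · rw [hq1, mul_assoc, hexact2]
    -- new invariant for rest
    have hinv' : ((t * a ≠ 0 ∧ rest.count 0 ≤ 1) ∨ (t * a = 0 ∧ s * a + t ≠ 0 ∧ rest.count 0 = 0)) := by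
      rcases hinv with ⟨htne, hcnt⟩ | ⟨ht0, hs0, hcnt⟩
      · by_cases ha : a = 0
        · right
          refine ⟨by simp [ha], by simp [ha, htne], ?_⟩
          simp [ha] at hcnt
          omega
        · left
          refine ⟨mul_ne_zero htne ha, ?_⟩
          simp [ha] at hcnt
          omega
      · have ha : a ≠ 0 := by
          intro h0; simp [h0] at hcnt
        right
        refine ⟨by simp [ht0], by simp [ht0]; exact ⟨hs0, ha⟩, ?_⟩
        simp [ha] at hcnt
        exact hcnt
    have := ih (s * a + t) (t * a) ((p * a + q) / g1) ((q * a) / g1) hrf' hinv'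
    simp only [solveLoop, mS, mP, ← hg1def]
    rw [hfd1, hfd2]
    exact this

-- RF determines the pair: it is the ediv of (s,t) by gcd(s,t)
lemma RF_unique (s t p q : Int) (h : RF s t p q) :
    p = s / (Int.gcd s t : Int) ∧ q = t / (Int.gcd s t : Int) ∧ 0 < Int.gcd s t := by
  obtain ⟨g, hg, hs, ht, hcop⟩ := h
  have hgcd : Int.gcd s t = g.natAbs * Int.gcd p q := by rw [hs, ht]; exact Int.gcd_mul_left g p q
  have hgabs : (g.natAbs : Int) = g := Int.natAbs_of_nonneg (le_of_lt hg)
  have hgcd' : (Int.gcd s t : Int) = g := by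
    rw [hgcd, hcop, mul_one]; exact hgabs
  have hgpos : 0 < Int.gcd s t := by
    have : (0 : Int) < (Int.gcd s t : Int) := by rw [hgcd']; exact hg
    exact_mod_cast this
  refine ⟨?_, ?_, hgpos⟩
  · rw [hgcd', hs, Int.mul_ediv_cancel_left _ (ne_of_gt hg)]
  · rw [hgcd', ht, Int.mul_ediv_cancel_left _ (ne_of_gt hg)]

lemma fdiv_one (x : Int) : PySem.Int.floordiv x 1 = x := by
  rw [PySem.Int.floordiv_eq_ediv_of_pos (show (0:Int) < 1 by norm_num)]; simp

theorem solve_eq_alt (N : Int) (A : List Int) (hpre : Pre_solve N A) :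
    solve N A = solve_alt N A := by
  have hmain := loop_main A 0 1 0 1 ⟨1, by norm_num, by ring, by ring, by simp⟩
    (Or.inl ⟨one_ne_zero, hpre⟩)
  set r := solveLoop A 0 1 with hr
  have hS : mS A 0 1 = othS A := by rw [mS_eq]; ring
  have hP : mP A 1 = A.prod := by rw [mP_eq]; ring
  rw [hS, hP] at hmain
  obtain ⟨hp, hq, hgpos⟩ := RF_unique _ _ _ _ hmain
  obtain ⟨g, hg, hs, ht, hcop⟩ := hmain
  have hAgcd : Int.gcd r.2 r.1 = 1 := by rw [Int.gcd_comm]; exact hcop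
  have hB : altLoop A ((sufProds A).drop 1) 0 1 = (othS A, A.prod) := by
    rw [altLoop_spec]; norm_num
  have hgc : Int.gcd A.prod (othS A) = Int.gcd (othS A) A.prod := Int.gcd_comm _ _
  have hpos' : (0:Int) < ((Int.gcd A.prod (othS A) : Nat) : Int) := by
    rw [hgc]; exact_mod_cast hgpos
  have f1 : PySem.Int.floordiv A.prod ((Int.gcd A.prod (othS A) : Nat) : Int) = r.2 := by
    rw [PySem.Int.floordiv_eq_ediv_of_pos hpos', hgc, hq]
  have f2 : PySem.Int.floordiv (othS A) ((Int.gcd A.prod (othS A) : Nat) : Int) = r.1 := by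
    rw [PySem.Int.floordiv_eq_ediv_of_pos hpos', hgc, hp]
  have e1 : solve N A = PySem.Int.toStr r.2 ++ "/" ++ PySem.Int.toStr r.1 := by
    unfold solve
    simp only [← hr, hAgcd, Nat.cast_one, fdiv_one]
  have e2 : solve_alt N A = PySem.Int.toStr r.2 ++ "/" ++ PySem.Int.toStr r.1 := by
    unfold solve_alt
    simp only [hB, f1, f2]
  rw [e1, e2]

-- ===== VERDICT (by name: the statement is the Claim_ definition above) =====
theorem solve_spec : Claim_equal_solve := by
  intro N A _ hpre
  unfold Spec_solve
  exact solve_eq_alt N A hpre
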